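-- pv_equiv track=rewrite | github.com/WinterDai/AAI_CL | Utilities/common/checker_templates/input_file_parser_template.py | _looks_like_file_path
-- ===== SOURCE A (Python) =====
-- def _looks_like_file_path(text: str) -> bool:
--     """
--     Check if a string looks like a file path.
--
--     Args:
--         text: String to check
--
--     Returns:
--         True if text appears to be a file path
--     """
--     # Check for path separators
--     if '/' not in text and '\\' not in text:
--         return False
--
--     # Check for common file extensions
--     common_exts = ['.rpt', '.log', '.tarpt', '.gz', '.yaml', '.json', '.txt', '.csv']
--     if any(text.lower().endswith(ext) for ext in common_exts):
--         return True
--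
--     # Check if it has at least one path component
--     parts = text.replace('\\', '/').split('/')
--     if len(parts) > 1:
--         return True
--
--     return False
-- ===== SOURCE B (Python) =====
-- def _looks_like_file_path(text: str) -> bool:
--     """
--     Check if a string looks like a file path.
--
--     Args:
--         text: String to check
--
--     Returns:
--         True if text appears to be a file path
--     """
--     # Once a separator is present, A's replace/split branch always yields
--     # more than one component, so the separator test alone decides.
--     return '/' in text or '\\' in text
-- ===== Notes on version B (the rewrite author's own statement) =====
-- stated objective: simpler
-- what changed: Collapsed A's three-branch body (separator guard, extension whitelist, replace-and-split component count) into a single membership test for either path separator, proved equivalent because once a separator is present the split always produces more than one part.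
import Mathlib
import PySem

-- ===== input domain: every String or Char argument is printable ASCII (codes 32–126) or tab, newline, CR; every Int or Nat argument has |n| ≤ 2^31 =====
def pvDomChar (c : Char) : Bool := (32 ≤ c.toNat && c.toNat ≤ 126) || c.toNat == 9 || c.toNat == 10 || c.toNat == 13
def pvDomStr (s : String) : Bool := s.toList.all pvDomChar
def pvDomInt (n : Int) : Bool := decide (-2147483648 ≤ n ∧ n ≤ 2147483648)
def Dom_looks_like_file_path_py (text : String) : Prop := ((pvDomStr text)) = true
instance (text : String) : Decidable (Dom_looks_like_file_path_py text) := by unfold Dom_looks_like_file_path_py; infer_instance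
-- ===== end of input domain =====

-- B collapses A's three branches into the single separator test, which is provably equivalent (simpler).

-- ===== PORT A =====
def looks_like_file_path_py (text : String) : Bool :=
  -- if '/' not in text and '\' not in text: return False
  if !(PySem.Str.isIn "/" text) && !(PySem.Str.isIn "\\" text) then false
  else
    -- common_exts = [...]; if any(text.lower().endswith(ext) for ext in common_exts): return True
    let common_exts : List String := [".rpt", ".log", ".tarpt", ".gz", ".yaml", ".json", ".txt", ".csv"]
    if common_exts.any (fun ext => PySem.Str.endswith (PySem.Str.lower text) ext) then true
    else
      -- parts = text.replace('\', '/').split('/'); '/' is nonempty so split? is always some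
      let parts := (PySem.Str.split? (PySem.Str.replace text "\\" "/") "/").getD []
      if parts.length > 1 then true else false

-- ===== PORT B =====
def looks_like_file_path_py_alt (text : String) : Bool :=
  PySem.Str.isIn "/" text || PySem.Str.isIn "\\" text

-- ===== PRECONDITION & SPEC =====
def Spec_looks_like_file_path_py (text : String) (out : Bool) : Prop := out = looks_like_file_path_py_alt text
instance (text : String) (out : Bool) : Decidable (Spec_looks_like_file_path_py text out) := by unfold Spec_looks_like_file_path_py; infer_instance

-- ===== CLAIM (what is proved, stated in full; the proofs are below) =====
def Claim_equal_looks_like_file_path_py : Prop := ∀ (text : String), Dom_looks_like_file_path_py text → Spec_looks_like_file_path_py text (looks_like_file_path_py text)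

-- ===== LEMMAS AND PROOFS =====

-- [a] is an infix of l iff a is a member of l
theorem pv_singleton_infix {a : Char} {l : List Char} : [a] <:+: l ↔ a ∈ l := by
  constructor
  · intro h; exact h.subset (List.mem_singleton_self a)
  · intro h
    obtain ⟨s, t, hst⟩ := List.append_of_mem h
    exact ⟨s, t, by simp [hst]⟩

-- replace.go with old = ['\'], new = ['/']: if '/' or '\' occurs in the remaining input
-- (or '/' already in the accumulator) and fuel covers the input, the result contains '/'
theorem pv_replace_go_mem (fuel : Nat) (l acc : List Char)
    (hf : l.length ≤ fuel) (h : '/' ∈ l ∨ '\\' ∈ l ∨ '/' ∈ acc) :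
    '/' ∈ PySem.Chars.replace.go ['\\'] ['/'] fuel l acc := by
  induction fuel generalizing l acc with
  | zero =>
    have : l = [] := List.eq_nil_of_length_eq_zero (Nat.le_zero.mp hf)
    subst this
    simp [PySem.Chars.replace.go] at h ⊢
    exact h
  | succ fuel ih =>
    cases l with
    | nil =>
      simp at h
      simpa [PySem.Chars.replace.go] using h
    | cons c t =>
      have hft : t.length ≤ fuel := by simp at hf; omega
      simp only [PySem.Chars.replace.go]
      by_cases hc : ['\\'].isPrefixOf (c :: t) = true
      · rw [if_pos hc]
        exact ih (List.drop ['\\'].length (c :: t)) (['/'].reverse ++ acc) (by simpa using hft)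
          (Or.inr (Or.inr (by simp)))
      · have hc' : ¬('\\' = c) := by
          intro hcc; exact hc (by subst hcc; simp [List.isPrefixOf])
        rw [if_neg hc]
        apply ih t (c :: acc) hft
        rcases h with h | h | h
        · rcases List.mem_cons.mp h with h | h
          · subst h; exact Or.inr (Or.inr (List.mem_cons_self))
          · exact Or.inl h
        · rcases List.mem_cons.mp h with h | h
          · exact absurd h hc'
          · exact Or.inr (Or.inl h)
        · exact Or.inr (Or.inr (List.mem_cons_of_mem _ h))

-- splitOn.go always returns at least acc.length + 1 pieces
theorem pv_splitOn_go_len (sep : List Char) (fuel : Nat) (l cur : List Char) (acc : List (List Char)) :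
    acc.length + 1 ≤ (PySem.Chars.splitOn.go sep fuel l cur acc).length := by
  induction fuel generalizing l cur acc with
  | zero => simp [PySem.Chars.splitOn.go]
  | succ fuel ih =>
    cases l with
    | nil => simp [PySem.Chars.splitOn.go]
    | cons c t =>
      simp only [PySem.Chars.splitOn.go]
      by_cases hc : sep.isPrefixOf (c :: t) = true
      · rw [if_pos hc]
        have := ih (List.drop sep.length (c :: t)) [] (cur.reverse :: acc)
        simp at this
        omega
      · rw [if_neg hc]
        exact ih t (c :: cur) acc

-- if '/' still occurs in the remaining input and fuel exceeds it, at least acc.length + 2 pieces result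
theorem pv_splitOn_go_gt (fuel : Nat) (l cur : List Char) (acc : List (List Char))
    (hf : l.length < fuel) (h : '/' ∈ l) :
    acc.length + 2 ≤ (PySem.Chars.splitOn.go ['/'] fuel l cur acc).length := by
  induction fuel generalizing l cur acc with
  | zero => omega
  | succ fuel ih =>
    cases l with
    | nil => simp at h
    | cons c t =>
      simp only [PySem.Chars.splitOn.go]
      by_cases hc : List.isPrefixOf ['/'] (c :: t) = true
      · rw [if_pos hc]
        have := pv_splitOn_go_len ['/'] fuel (List.drop (List.length ['/']) (c :: t)) [] (cur.reverse :: acc)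
        simp at this ⊢
        omega
      · have hc' : ¬('/' = c) := by
          intro hcc; exact hc (by subst hcc; simp [List.isPrefixOf])
        rw [if_neg hc]
        apply ih
        · simp at hf ⊢; omega
        · rcases List.mem_cons.mp h with h | h
          · exact absurd h hc'
          · exact h

-- the whole third branch: a separator anywhere in text makes the split have > 1 parts
theorem pv_parts_gt_one (text : String)
    (h : '/' ∈ text.toList ∨ '\\' ∈ text.toList) :
    1 < ((PySem.Str.split? (PySem.Str.replace text "\\" "/") "/").getD []).length := by
  have hmem : '/' ∈ PySem.Chars.replace text.toList ['\\'] ['/'] := by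
    unfold PySem.Chars.replace
    simp only [List.isEmpty_cons, Bool.false_eq_true, if_false]
    exact pv_replace_go_mem _ _ _ (le_refl _) (by tauto)
  have hsplit : (PySem.Str.split? (PySem.Str.replace text "\\" "/") "/").getD []
      = List.map String.ofList
          (PySem.Chars.splitOn (PySem.Str.replace text "\\" "/").toList ['/']) := by
    simp [PySem.Str.split?, PySem.Chars.split?]
  rw [hsplit]
  have htl : (PySem.Str.replace text "\\" "/").toList
      = PySem.Chars.replace text.toList ['\\'] ['/'] := by
    simp [PySem.Str.replace]
  rw [htl]
  simp only [List.length_map]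
  unfold PySem.Chars.splitOn
  have := pv_splitOn_go_gt (List.length (PySem.Chars.replace text.toList ['\\'] ['/']) + 1)
    (PySem.Chars.replace text.toList ['\\'] ['/']) [] [] (Nat.lt_succ_self _) hmem
  simpa using this

theorem pv_isIn_single (sub : String) (c : Char) (hsub : sub.toList = [c]) (s : String) :
    PySem.Str.isIn sub s = true ↔ c ∈ s.toList := by
  unfold PySem.Str.isIn
  rw [hsub, PySem.Chars.isIn_iff_infix]
  exact pv_singleton_infix

-- when a separator is present, A takes the true branch (extension hit or > 1 parts)
theorem pv_A_true (text : String) (hmem : '/' ∈ text.toList ∨ '\\' ∈ text.toList) :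
    looks_like_file_path_py text = true := by
  have hgt := pv_parts_gt_one text hmem
  have h1 : (PySem.Str.isIn "/" text = true) ∨ (PySem.Str.isIn "\\" text = true) := by
    rcases hmem with h | h
    · exact Or.inl ((pv_isIn_single "/" '/' (by decide) text).mpr h)
    · exact Or.inr ((pv_isIn_single "\\" '\\' (by decide) text).mpr h)
  unfold looks_like_file_path_py
  have hguard : (!(PySem.Str.isIn "/" text) && !(PySem.Str.isIn "\\" text)) = false := by
    rcases h1 with h | h <;> rw [h] <;> simp
  rw [if_neg (by rw [hguard]; simp)]
  dsimp only
  split_ifs with hext  -- the inner condition is discharged by hgt in context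
  · rfl
  · rfl


-- ===== VERDICT (by name: the statement is the Claim_ definition above) =====
theorem looks_like_file_path_py_spec : Claim_equal_looks_like_file_path_py := by
  intro text _
  unfold Spec_looks_like_file_path_py
  by_cases h1 : PySem.Str.isIn "/" text = true
  · rw [pv_A_true text (Or.inl ((pv_isIn_single "/" '/' (by decide) text).mp h1))]
    unfold looks_like_file_path_py_alt
    rw [h1]; simp
  · by_cases h2 : PySem.Str.isIn "\\" text = true
    · rw [pv_A_true text (Or.inr ((pv_isIn_single "\\" '\\' (by decide) text).mp h2))]
      unfold looks_like_file_path_py_alt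
      rw [h2]; simp
    · unfold looks_like_file_path_py looks_like_file_path_py_alt
      simp only [Bool.not_eq_true] at h1 h2
      rw [h1, h2]; simp
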